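-- pv_equiv track=rewrite | github.com/muherng/planning | generate_cfg.py | lexicographic_min_derivation
-- ===== SOURCE A (Python) =====
-- def lexicographic_min_derivation(tokens):
--     """Return lexicographically smallest rule-ID sequence that derives tokens."""
--     n = len(tokens)
--
--     # DP table: best[(i, j)] -> minimal rule sequence deriving span i..j as E
--     best = {}
--
--     # Base cases (single token = id)
--     for i, tok in enumerate(tokens):
--         if tok == "id":
--             best[(i, i + 1)] = [4]
--
--     # Handle spans of increasing length
--     for span_len in range(2, n + 1):
--         for i in range(0, n - span_len + 1):
--             j = i + span_len
--             candidates = []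
--
--             # Rule 3: parenthesis
--             if tokens[i] == "(" and tokens[j - 1] == ")":
--                 inner = best.get((i + 1, j - 1))
--                 if inner is not None:
--                     candidates.append([3] + inner)
--
--             # Rules 1 and 2
--             for k in range(i + 1, j - 1):
--                 token_k = tokens[k]
--                 if token_k not in {"+", "*"}:
--                     continue
--                 left = best.get((i, k))
--                 right = best.get((k + 1, j))
--                 if left is None or right is None:
--                     continue
--                 if token_k == "+":
--                     candidates.append([1] + left + right)
--                 else:  # '*'
--                     candidates.append([2] + left + right)
--
--             if candidates:
--                 best[(i, j)] = min(candidates)  # lexicographic min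
--
--     return best.get((0, n))
-- ===== SOURCE B (Python) =====
-- def lexicographic_min_derivation(tokens):
--     """Return lexicographically smallest rule-ID sequence that derives tokens."""
--     n = len(tokens)
--     memo = {}
--
--     def solve(i, j):
--         if (i, j) in memo:
--             return memo[(i, j)]
--         if j == i + 1:
--             res = [4] if tokens[i] == "id" else None
--         elif j >= i + 2:
--             cands = []
--             if tokens[i] == "(" and tokens[j - 1] == ")":
--                 inner = solve(i + 1, j - 1)
--                 if inner is not None:
--                     cands.append([3] + inner)
--             for k in range(i + 1, j - 1):
--                 tk = tokens[k]
--                 if tk == "+" or tk == "*":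
--                     left = solve(i, k)
--                     right = solve(k + 1, j)
--                     if left is not None and right is not None:
--                         cands.append(([1] if tk == "+" else [2]) + left + right)
--             res = min(cands) if cands else None
--         else:
--             res = None
--         memo[(i, j)] = res
--         return res
--
--     return solve(0, n)
-- ===== Notes on version B (the rewrite author's own statement) =====
-- stated objective: alternative
-- what changed: Replaces the bottom-up span-length DP over a dict of all spans with top-down memoized recursion (solve(i,j) with a memo cache) that only computes spans reachable from the whole sequence.
import Mathlib
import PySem

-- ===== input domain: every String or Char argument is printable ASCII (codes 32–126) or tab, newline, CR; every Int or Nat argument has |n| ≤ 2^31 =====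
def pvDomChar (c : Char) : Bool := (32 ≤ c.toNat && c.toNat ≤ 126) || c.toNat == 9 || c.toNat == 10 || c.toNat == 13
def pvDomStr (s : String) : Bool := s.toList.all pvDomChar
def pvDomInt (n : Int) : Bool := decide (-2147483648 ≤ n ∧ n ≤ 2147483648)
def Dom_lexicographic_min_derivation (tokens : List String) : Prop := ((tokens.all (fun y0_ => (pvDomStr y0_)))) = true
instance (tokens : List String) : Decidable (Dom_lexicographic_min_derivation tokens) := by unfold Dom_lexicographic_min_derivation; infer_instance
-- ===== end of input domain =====

-- B re-implements the bottom-up DP as top-down memoized recursion over spans (objective: alternative decomposition, same asymptotic cost).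

-- ===== PORT A =====
-- the body of A's inner "for i in range(...)" loop (named so the proofs can speak about it)
def pvABody (t : List String) (span_len : Int) (best : PySem.Dict (Int × Int) (List Int)) (i : Int) :
    PySem.Dict (Int × Int) (List Int) :=
  let j := i + span_len
  let candidates : List (List Int) := []
  -- tokens[i] / tokens[j-1] / tokens[k]: the loop bounds keep these indices in range, so pyGetD is exact here
  let candidates :=
    if PySem.List.pyGetD t i "" = "(" ∧ PySem.List.pyGetD t (j - 1) "" = ")" then
      match best.get? (i + 1, j - 1) with
      | some inner => candidates ++ [[3] ++ inner]
      | none => candidates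
    else candidates
  let candidates :=
    (PySem.List.pyRange (i + 1) (j - 1) 1).foldl (fun candidates k =>
      let token_k := PySem.List.pyGetD t k ""
      if ¬(token_k = "+" ∨ token_k = "*") then candidates
      else
        match best.get? (i, k), best.get? (k + 1, j) with
        | some left, some right =>
            candidates ++ [(if token_k = "+" then ([1] : List Int) else [2]) ++ left ++ right]
        | _, _ => candidates) candidates
  -- min(candidates) guarded by "if candidates": min? is none exactly on the empty list
  match PySem.List.min? candidates (fun x => x) with
  | some m => best.insert (i, j) m
  | none => best

def lexicographic_min_derivation (tokens : List String) : Option (List Int) :=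
  let n : Int := PySem.List.len tokens
  let best : PySem.Dict (Int × Int) (List Int) :=
    (PySem.List.enumerate tokens 0).foldl (fun best itok =>
      if itok.2 = "id" then best.insert (itok.1, itok.1 + 1) [4] else best) PySem.Dict.empty
  let best :=
    (PySem.List.pyRange 2 (n + 1) 1).foldl (fun best span_len =>
      (PySem.List.pyRange 0 (n - span_len + 1) 1).foldl (pvABody tokens span_len) best) best
  best.get? (0, n)

-- ===== PORT B =====
-- top-down memoized recursion; the Nat fuel only makes the recursion total (never exhausted from the wrapper)
mutual
def pvSolveB (t : List String) (fuel : Nat) (memo : PySem.Dict (Int × Int) (Option (List Int)))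
    (i j : Int) : Option (List Int) × PySem.Dict (Int × Int) (Option (List Int)) :=
  match fuel with
  | 0 => (none, memo)
  | fuel + 1 =>
    match memo.get? (i, j) with
    | some r => (r, memo)
    | none =>
      if j = i + 1 then
        let res := if PySem.List.pyGetD t i "" = "id" then some ([4] : List Int) else none
        (res, memo.insert (i, j) res)
      else if i + 2 ≤ j then
        let pm :=
          if PySem.List.pyGetD t i "" = "(" ∧ PySem.List.pyGetD t (j - 1) "" = ")" then
            let im := pvSolveB t fuel memo (i + 1) (j - 1)
            ((match im.1 with
              | some v => [[3] ++ v]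
              | none => ([] : List (List Int))), im.2)
          else (([] : List (List Int)), memo)
        let cm := pvSplitB t fuel i j (PySem.List.pyRange (i + 1) (j - 1) 1) pm.1 pm.2
        let res := PySem.List.min? cm.1 (fun x => x)
        (res, cm.2.insert (i, j) res)
      else (none, memo.insert (i, j) none)
termination_by (fuel, 0)

def pvSplitB (t : List String) (fuel : Nat) (i j : Int) (ks : List Int)
    (cands : List (List Int)) (memo : PySem.Dict (Int × Int) (Option (List Int))) :
    List (List Int) × PySem.Dict (Int × Int) (Option (List Int)) :=
  match ks with
  | [] => (cands, memo)
  | k :: rest =>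
    let tk := PySem.List.pyGetD t k ""
    if tk = "+" ∨ tk = "*" then
      let lm := pvSolveB t fuel memo i k
      let rm := pvSolveB t fuel lm.2 (k + 1) j
      let cands :=
        match lm.1, rm.1 with
        | some l, some r => cands ++ [(if tk = "+" then ([1] : List Int) else [2]) ++ l ++ r]
        | _, _ => cands
      pvSplitB t fuel i j rest cands rm.2
    else pvSplitB t fuel i j rest cands memo
termination_by (fuel, ks.length + 1)
end

def lexicographic_min_derivation_alt (tokens : List String) : Option (List Int) :=
  (pvSolveB tokens (tokens.length + 1) PySem.Dict.empty 0 (PySem.List.len tokens)).1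

-- ===== PRECONDITION & SPEC =====
def Spec_lexicographic_min_derivation (tokens : List String) (out : Option (List Int)) : Prop := out = lexicographic_min_derivation_alt tokens
instance (tokens : List String) (out : Option (List Int)) : Decidable (Spec_lexicographic_min_derivation tokens out) := by unfold Spec_lexicographic_min_derivation; infer_instance

-- ===== CLAIM (what is proved, stated in full; the proofs are below) =====
def Claim_equal_lexicographic_min_derivation : Prop := ∀ (tokens : List String), Dom_lexicographic_min_derivation tokens → Spec_lexicographic_min_derivation tokens (lexicographic_min_derivation tokens)

-- ===== LEMMAS AND PROOFS =====

-- pure reference recurrence: pvRef t i j = minimal rule sequence deriving the span [i, j), none if underivable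
def pvCandAt (t : List String) (g : Int → Int → Option (List Int)) (i j k : Int) : List (List Int) :=
  let tk := PySem.List.pyGetD t k ""
  if tk = "+" ∨ tk = "*" then
    match g i k, g (k + 1) j with
    | some l, some r => [(if tk = "+" then ([1] : List Int) else [2]) ++ l ++ r]
    | _, _ => []
  else []

def pvParen (t : List String) (g : Int → Int → Option (List Int)) (i j : Int) : List (List Int) :=
  if PySem.List.pyGetD t i "" = "(" ∧ PySem.List.pyGetD t (j - 1) "" = ")" then
    match g (i + 1) (j - 1) with
    | some v => [[3] ++ v]
    | none => []
  else []

def pvCands (t : List String) (g : Int → Int → Option (List Int)) (i j : Int) : List (List Int) :=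
  pvParen t g i j ++ (PySem.List.pyRange (i + 1) (j - 1) 1).flatMap (pvCandAt t g i j)

def pvRefF (t : List String) : Nat → Int → Int → Option (List Int)
  | 0, _, _ => none
  | (fuel + 1), i, j =>
    if j = i + 1 then (if PySem.List.pyGetD t i "" = "id" then some [4] else none)
    else if i + 2 ≤ j then PySem.List.min? (pvCands t (pvRefF t fuel) i j) (fun x => x)
    else none

def pvRef (t : List String) (i j : Int) : Option (List Int) := pvRefF t ((j - i).toNat + 1) i j

lemma pvGetD_high (t : List String) (i : Int) (d : String) (h : PySem.List.len t ≤ i) :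
    PySem.List.pyGetD t i d = d := by
  simp only [PySem.List.pyGetD]
  rw [(PySem.List.pyGet?_eq_none_iff _ _).2]
  · rfl
  · simp only [PySem.Raise.InRange]
    simp only [PySem.List.len_eq] at h
    omega

lemma pvCands_congr (t : List String) (g g' : Int → Int → Option (List Int)) (i j : Int)
    (h : ∀ a b : Int, i ≤ a → b ≤ j → b - a ≤ j - i - 2 → g a b = g' a b) :
    pvCands t g i j = pvCands t g' i j := by
  unfold pvCands
  have h1 : pvParen t g i j = pvParen t g' i j := by
    unfold pvParen
    split
    · rw [h (i + 1) (j - 1) (by omega) (by omega) (by omega)]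
    · rfl
  rw [h1]
  congr 1
  apply List.flatMap_congr
  intro k hk
  rw [PySem.List.mem_pyRange_one] at hk
  unfold pvCandAt
  rw [h i k (by omega) (by omega) (by omega), h (k + 1) j (by omega) (by omega) (by omega)]

lemma pvRefF_mono (t : List String) :
    ∀ (f1 f2 : Nat) (i j : Int), j - i < (f1 : Int) → j - i < (f2 : Int) →
      pvRefF t f1 i j = pvRefF t f2 i j := by
  have hneg : ∀ (f : Nat) (i j : Int), j ≤ i → pvRefF t f i j = none := by
    intro f i j hij
    match f with
    | 0 => rfl
    | (f + 1) =>
      simp only [pvRefF]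
      rw [if_neg (by omega), if_neg (by omega)]
  intro f1
  induction f1 with
  | zero =>
    intro f2 i j h1 h2
    exact ((hneg 0 i j (by omega)).trans (hneg f2 i j (by omega)).symm)
  | succ f1 ih =>
    intro f2 i j h1 h2
    match f2, h2 with
    | 0, h2 =>
      exact ((hneg (f1 + 1) i j (by omega)).trans (hneg 0 i j (by omega)).symm)
    | (f2 + 1), h2 =>
      simp only [pvRefF]
      by_cases hb : j = i + 1
      · simp [hb]
      · rw [if_neg hb, if_neg hb]
        by_cases hs : i + 2 ≤ j
        · rw [if_pos hs, if_pos hs]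
          rw [pvCands_congr t (pvRefF t f1) (pvRefF t f2) i j]
          intro a b ha hbj hskip
          exact ih f2 a b (by omega) (by omega)
        · rw [if_neg hs, if_neg hs]

lemma pvRef_base (t : List String) (i j : Int) (h : j = i + 1) :
    pvRef t i j = (if PySem.List.pyGetD t i "" = "id" then some [4] else none) := by
  subst h
  unfold pvRef
  have : (i + 1 - i).toNat + 1 = 2 := by omega
  rw [this]
  simp [pvRefF]

lemma pvRef_none (t : List String) (i j : Int) (h : j ≤ i) : pvRef t i j = none := by
  unfold pvRef
  simp only [pvRefF]
  rw [if_neg (by omega), if_neg (by omega)]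

lemma pvRef_step (t : List String) (i j : Int) (h : i + 2 ≤ j) :
    pvRef t i j = PySem.List.min? (pvCands t (pvRef t) i j) (fun x => x) := by
  have e1 : pvRef t i j = PySem.List.min? (pvCands t (pvRefF t ((j - i).toNat)) i j) (fun x => x) := by
    show pvRefF t ((j - i).toNat + 1) i j = _
    simp only [pvRefF]
    rw [if_neg (by omega), if_pos h]
  rw [e1]
  congr 1
  apply pvCands_congr
  intro a b ha hb hs
  show pvRefF t ((j - i).toNat) a b = pvRef t a b
  unfold pvRef
  exact pvRefF_mono t _ _ a b (by omega) (by omega)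

lemma pvRef_oob (t : List String) :
    ∀ (m : Nat) (i j : Int), (j - i).toNat ≤ m → PySem.List.len t < j → pvRef t i j = none := by
  intro m
  induction m with
  | zero => intro i j hm hlen; exact pvRef_none t i j (by omega)
  | succ m ih =>
    intro i j hm hlen
    by_cases hij : j ≤ i
    · exact pvRef_none t i j hij
    by_cases hb : j = i + 1
    · rw [pvRef_base t i j hb, pvGetD_high t i "" (by omega)]
      simp
    · have hs : i + 2 ≤ j := by omega
      rw [pvRef_step t i j hs]
      have hp : pvParen t (pvRef t) i j = [] := by
        unfold pvParen
        rw [if_neg]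
        intro hcon
        rw [pvGetD_high t (j - 1) "" (by omega)] at hcon
        exact absurd hcon.2 (by decide)
      have hcands : pvCands t (pvRef t) i j = [] := by
        unfold pvCands
        rw [hp, List.nil_append]
        rw [List.flatMap_congr (g := fun _ => ([] : List (List Int))) ?_]
        · simp
        · intro k hk
          rw [PySem.List.mem_pyRange_one] at hk
          have hr : pvRef t (k + 1) j = none := ih (k + 1) j (by omega) hlen
          unfold pvCandAt
          cases h' : pvRef t i k <;> simp [hr]
      rw [hcands]
      rfl

-- ---- A-side: the DP table always holds pvRef on the processed spans ----

lemma pvBase_get (t : List String) :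
    ∀ (m : Nat) (lo : Int) (d : PySem.Dict (Int × Int) (List Int)) (a b : Int),
      0 ≤ lo → m = (PySem.List.len t - lo).toNat →
      (((PySem.List.pyRange lo (PySem.List.len t) 1).foldl
          (fun best j => if PySem.List.pyGetD t j "" = "id" then best.insert (j, j + 1) [4] else best)
          d).get? (a, b))
        = if lo ≤ a ∧ a < PySem.List.len t ∧ b = a + 1 ∧ PySem.List.pyGetD t a "" = "id"
          then some [4] else d.get? (a, b) := by
  intro m
  induction m with
  | zero =>
    intro lo d a b hlo hm
    rw [PySem.List.pyRange_one_eq_nil (by omega)]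
    simp only [List.foldl_nil]
    rw [if_neg]
    rintro ⟨h1, h2, -⟩
    omega
  | succ m ih =>
    intro lo d a b hlo hm
    by_cases hlt : lo < PySem.List.len t
    case neg =>
      rw [PySem.List.pyRange_one_eq_nil (by omega)]
      simp only [List.foldl_nil]
      rw [if_neg]
      rintro ⟨h1, h2, -⟩
      omega
    case pos =>
      rw [PySem.List.pyRange_one_cons (by omega)]
      simp only [List.foldl_cons]
      rw [ih (lo + 1) _ a b (by omega) (by omega)]
      by_cases ha : a = lo
      · subst ha
        rw [if_neg (by rintro ⟨h1, -⟩; omega)]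
        by_cases hP : PySem.List.pyGetD t a "" = "id"
        · rw [if_pos hP, PySem.Dict.get?_insert]
          by_cases hb : b = a + 1
          · subst hb
            rw [if_pos rfl, if_pos ⟨by omega, by omega, rfl, hP⟩]
          · rw [if_neg (by simp only [Prod.mk.injEq]; tauto),
                if_neg (by rintro ⟨-, -, h, -⟩; exact hb h)]
        · rw [if_neg hP, if_neg (by rintro ⟨-, -, -, h⟩; exact hP h)]
      · have hkey : ((a, b) : Int × Int) ≠ (lo, lo + 1) := by
          simp only [ne_eq, Prod.mk.injEq]
          tauto
        have hd : (if PySem.List.pyGetD t lo "" = "id"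
              then d.insert (lo, lo + 1) [4] else d).get? (a, b) = d.get? (a, b) := by
          split
          · rw [PySem.Dict.get?_insert, if_neg hkey]
          · rfl
        rw [hd]
        have hiff : (lo + 1 ≤ a ∧ a < PySem.List.len t ∧ b = a + 1 ∧ PySem.List.pyGetD t a "" = "id")
            ↔ (lo ≤ a ∧ a < PySem.List.len t ∧ b = a + 1 ∧ PySem.List.pyGetD t a "" = "id") := by
          constructor
          · rintro ⟨h1, h⟩; exact ⟨by omega, h⟩
          · rintro ⟨h1, h⟩; exact ⟨by omega, h⟩
        simp only [hiff]

lemma pvABody_get (t : List String) (L i : Int) (best : PySem.Dict (Int × Int) (List Int))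
    (hL : 2 ≤ L) (hi : 0 ≤ i)
    (e : ∀ p q : Int, 0 ≤ p → q - p ≤ L - 1 → best.get? (p, q) = pvRef t p q)
    (hself : best.get? (i, i + L) = none) :
    ∀ a b : Int, (pvABody t L best i).get? (a, b)
      = if a = i ∧ b = i + L then pvRef t i (i + L) else best.get? (a, b) := by
  intro a b
  simp only [pvABody]
  have hparen : (if PySem.List.pyGetD t i "" = "(" ∧ PySem.List.pyGetD t (i + L - 1) "" = ")" then
        match best.get? (i + 1, i + L - 1) with
        | some inner => ([] : List (List Int)) ++ [[3] ++ inner]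
        | none => ([] : List (List Int))
      else ([] : List (List Int))) = pvParen t (pvRef t) i (i + L) := by
    unfold pvParen
    rw [e (i + 1) (i + L - 1) (by omega) (by omega)]
    cases pvRef t (i + 1) (i + L - 1) <;> simp
  have hbody : (fun (candidates : List (List Int)) (k : Int) =>
        if ¬(PySem.List.pyGetD t k "" = "+" ∨ PySem.List.pyGetD t k "" = "*") then candidates
        else
          match best.get? (i, k), best.get? (k + 1, i + L) with
          | some left, some right =>
            candidates ++ [(if PySem.List.pyGetD t k "" = "+" then ([1] : List Int) else [2]) ++ left ++ right]
          | _, _ => candidates)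
      = fun (candidates : List (List Int)) (k : Int) => candidates ++
          (if ¬(PySem.List.pyGetD t k "" = "+" ∨ PySem.List.pyGetD t k "" = "*") then []
           else
            match best.get? (i, k), best.get? (k + 1, i + L) with
            | some left, some right =>
              [(if PySem.List.pyGetD t k "" = "+" then ([1] : List Int) else [2]) ++ left ++ right]
            | _, _ => []) := by
    funext cs k
    split
    · simp
    · cases best.get? (i, k) <;> cases best.get? (k + 1, i + L) <;> simp
  rw [hparen, hbody, PySem.List.foldl_append_eq_flatMap]
  have hflat : (PySem.List.pyRange (i + 1) (i + L - 1) 1).flatMap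
        (fun (k : Int) =>
          (if ¬(PySem.List.pyGetD t k "" = "+" ∨ PySem.List.pyGetD t k "" = "*") then []
           else
            match best.get? (i, k), best.get? (k + 1, i + L) with
            | some left, some right =>
              [(if PySem.List.pyGetD t k "" = "+" then ([1] : List Int) else [2]) ++ left ++ right]
            | _, _ => []))
      = (PySem.List.pyRange (i + 1) (i + L - 1) 1).flatMap (pvCandAt t (pvRef t) i (i + L)) := by
    apply List.flatMap_congr
    intro k hk
    rw [PySem.List.mem_pyRange_one] at hk
    rw [e i k (by omega) (by omega), e (k + 1) (i + L) (by omega) (by omega)]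
    unfold pvCandAt
    by_cases htk : PySem.List.pyGetD t k "" = "+" ∨ PySem.List.pyGetD t k "" = "*"
    · rw [if_neg (not_not_intro htk), if_pos htk]
    · rw [if_pos htk, if_neg htk]
  rw [hflat]
  have hcs : pvParen t (pvRef t) i (i + L) ++
      (PySem.List.pyRange (i + 1) (i + L - 1) 1).flatMap (pvCandAt t (pvRef t) i (i + L))
      = pvCands t (pvRef t) i (i + L) := rfl
  rw [hcs]
  have hstep : pvRef t i (i + L) = PySem.List.min? (pvCands t (pvRef t) i (i + L)) (fun x => x) :=
    pvRef_step t i (i + L) (by omega)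
  cases hmin : PySem.List.min? (pvCands t (pvRef t) i (i + L)) (fun x => x) with
  | none =>
    have hr : pvRef t i (i + L) = none := by rw [hstep, hmin]
    by_cases hab : a = i ∧ b = i + L
    · obtain ⟨h1, h2⟩ := hab
      rw [if_pos ⟨h1, h2⟩, hr, h1, h2, hself]
    · rw [if_neg hab]
  | some m =>
    have hr : pvRef t i (i + L) = some m := by rw [hstep, hmin]
    rw [PySem.Dict.get?_insert]
    by_cases hab : a = i ∧ b = i + L
    · rw [if_pos (by simp [Prod.ext_iff]; exact hab), if_pos hab, hr]
    · rw [if_neg (by simp [Prod.ext_iff]; exact fun h1 h2 => hab ⟨h1, h2⟩), if_neg hab]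

lemma pvInner (t : List String) (L : Int) (hL : 2 ≤ L) :
    ∀ (m : Nat) (i0 : Int) (best : PySem.Dict (Int × Int) (List Int)),
      0 ≤ i0 → m = (PySem.List.len t - L + 1 - i0).toNat →
      (∀ a b : Int, best.get? (a, b)
          = if 0 ≤ a ∧ (b - a ≤ L - 1 ∨ (b - a = L ∧ a < i0)) then pvRef t a b else none) →
      ∀ a b : Int,
        (((PySem.List.pyRange i0 (PySem.List.len t - L + 1) 1).foldl (pvABody t L) best).get? (a, b))
          = if 0 ≤ a ∧ b - a ≤ L then pvRef t a b else none := by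
  intro m
  induction m with
  | zero =>
    intro i0 best h0 hm hyp a b
    rw [PySem.List.pyRange_one_eq_nil (by omega), List.foldl_nil, hyp a b]
    by_cases hc : 0 ≤ a ∧ b - a ≤ L
    · rw [if_pos hc]
      by_cases hc2 : b - a ≤ L - 1 ∨ (b - a = L ∧ a < i0)
      · rw [if_pos ⟨hc.1, hc2⟩]
      · rw [if_neg (by tauto)]
        rw [pvRef_oob t (b - a).toNat a b (le_refl _) (by omega)]
    · rw [if_neg hc, if_neg (by omega)]
  | succ m ih =>
    intro i0 best h0 hm hyp
    rw [PySem.List.pyRange_one_cons (by omega)]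
    simp only [List.foldl_cons]
    refine ih (i0 + 1) (pvABody t L best i0) (by omega) (by omega) ?_
    intro a b
    have hsub : ∀ p q : Int, 0 ≤ p → q - p ≤ L - 1 → best.get? (p, q) = pvRef t p q := by
      intro p q h1 h2
      rw [hyp p q, if_pos ⟨h1, Or.inl h2⟩]
    have hself : best.get? (i0, i0 + L) = none := by
      rw [hyp i0 (i0 + L), if_neg (by omega)]
    rw [pvABody_get t L i0 best hL h0 hsub hself a b]
    by_cases hab : a = i0 ∧ b = i0 + L
    · obtain ⟨h1, h2⟩ := hab
      subst h1; subst h2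
      rw [if_pos ⟨rfl, rfl⟩, if_pos (by omega)]
    · rw [if_neg hab, hyp a b]
      by_cases hc : 0 ≤ a ∧ (b - a ≤ L - 1 ∨ (b - a = L ∧ a < i0))
      · rw [if_pos hc, if_pos (by omega)]
      · rw [if_neg hc, if_neg (by omega)]

lemma pvOuter (t : List String) :
    ∀ (m : Nat) (L0 : Int) (best : PySem.Dict (Int × Int) (List Int)),
      2 ≤ L0 → m = (PySem.List.len t + 1 - L0).toNat →
      (∀ a b : Int, best.get? (a, b) = if 0 ≤ a ∧ b - a ≤ L0 - 1 then pvRef t a b else none) →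
      ∀ a b : Int,
        (((PySem.List.pyRange L0 (PySem.List.len t + 1) 1).foldl
            (fun best L => (PySem.List.pyRange 0 (PySem.List.len t - L + 1) 1).foldl (pvABody t L) best)
            best).get? (a, b))
          = if 0 ≤ a ∧ (b - a ≤ L0 - 1 ∨ b - a ≤ PySem.List.len t) then pvRef t a b else none := by
  intro m
  induction m with
  | zero =>
    intro L0 best hL0 hm hyp a b
    rw [PySem.List.pyRange_one_eq_nil (by omega), List.foldl_nil, hyp a b]
    by_cases hc : 0 ≤ a ∧ b - a ≤ L0 - 1
    · rw [if_pos hc, if_pos (by omega)]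
    · rw [if_neg hc, if_neg (by omega)]
  | succ m ih =>
    intro L0 best hL0 hm hyp
    rw [PySem.List.pyRange_one_cons (by omega)]
    simp only [List.foldl_cons]
    have hyp' : ∀ a b : Int, best.get? (a, b)
        = if 0 ≤ a ∧ (b - a ≤ L0 - 1 ∨ (b - a = L0 ∧ a < 0)) then pvRef t a b else none := by
      intro a b
      rw [hyp a b]
      by_cases hc : 0 ≤ a ∧ b - a ≤ L0 - 1
      · rw [if_pos hc, if_pos (by omega)]
      · rw [if_neg hc, if_neg (by omega)]
    have hinner := pvInner t L0 hL0 (PySem.List.len t - L0 + 1 - 0).toNat 0 best (le_refl 0)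
        rfl hyp'
    intro a b
    rw [ih (L0 + 1) _ (by omega) (by omega) (fun a b => by
          rw [hinner a b]
          by_cases hc : 0 ≤ a ∧ b - a ≤ L0
          · rw [if_pos hc, if_pos (by omega)]
          · rw [if_neg hc, if_neg (by omega)]) a b]
    by_cases hc : 0 ≤ a ∧ (b - a ≤ L0 + 1 - 1 ∨ b - a ≤ PySem.List.len t)
    · rw [if_pos hc, if_pos (by omega)]
    · rw [if_neg hc, if_neg (by omega)]

lemma pvA_eq_ref (t : List String) :
    lexicographic_min_derivation t = pvRef t 0 (PySem.List.len t) := by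
  simp only [lexicographic_min_derivation]
  rw [PySem.List.enumerate_eq_map_pyRange t "", List.foldl_map]
  have hbase : ∀ a b : Int,
      ((PySem.List.pyRange 0 (PySem.List.len t) 1).foldl
        (fun best j => if PySem.List.pyGetD t j "" = "id" then best.insert (j, j + 1) [4] else best)
        PySem.Dict.empty).get? (a, b)
      = if 0 ≤ a ∧ b - a ≤ 2 - 1 then pvRef t a b else none := by
    intro a b
    rw [pvBase_get t (PySem.List.len t - 0).toNat 0 PySem.Dict.empty a b (le_refl 0) rfl,
        PySem.Dict.get?_empty]
    by_cases h1 : 0 ≤ a ∧ b - a ≤ 2 - 1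
    · rw [if_pos h1]
      by_cases hb1 : b = a + 1
      · rw [pvRef_base t a b hb1]
        by_cases hP : PySem.List.pyGetD t a "" = "id"
        · by_cases ha2 : a < PySem.List.len t
          · rw [if_pos ⟨h1.1, ha2, hb1, hP⟩, if_pos hP]
          · rw [pvGetD_high t a "" (by omega)] at hP
            exact absurd hP (by decide)
        · rw [if_neg (by rintro ⟨-, -, -, c4⟩; exact hP c4), if_neg hP]
      · rw [if_neg (by rintro ⟨-, -, c3, -⟩; exact hb1 c3), pvRef_none t a b (by omega)]
    · rw [if_neg (by rintro ⟨c1, -, c3, -⟩; omega), if_neg h1]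
  rw [pvOuter t (PySem.List.len t + 1 - 2).toNat 2 _ (by norm_num) rfl hbase 0 (PySem.List.len t),
      if_pos ⟨le_refl 0, Or.inr (by omega)⟩]

-- ---- B-side: the memo only ever holds pvRef values, and solve returns pvRef ----

def pvGood (t : List String) (memo : PySem.Dict (Int × Int) (Option (List Int))) : Prop :=
  ∀ (p : Int × Int) (r : Option (List Int)), memo.get? p = some r → r = pvRef t p.1 p.2

lemma pvGood_insert (t : List String) (memo : PySem.Dict (Int × Int) (Option (List Int)))
    (i j : Int) (r : Option (List Int)) (hg : pvGood t memo) (hr : r = pvRef t i j) :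
    pvGood t (memo.insert (i, j) r) := by
  intro p s hget
  rw [PySem.Dict.get?_insert] at hget
  by_cases hp : p = (i, j)
  · subst hp; simp at hget; subst hget; simpa using hr
  · rw [if_neg hp] at hget; exact hg p s hget

lemma pvSplitB_spec (t : List String) (fuel : Nat)
    (IH : ∀ (i j : Int) (memo : PySem.Dict (Int × Int) (Option (List Int))),
        pvGood t memo → j - i < (fuel : Int) →
        (pvSolveB t fuel memo i j).1 = pvRef t i j ∧ pvGood t (pvSolveB t fuel memo i j).2) :
    ∀ (ks : List Int) (i j : Int) (cands : List (List Int))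
      (memo : PySem.Dict (Int × Int) (Option (List Int))),
      pvGood t memo → (∀ k ∈ ks, k - i < (fuel : Int) ∧ j - (k + 1) < (fuel : Int)) →
      (pvSplitB t fuel i j ks cands memo).1 = cands ++ ks.flatMap (pvCandAt t (pvRef t) i j)
        ∧ pvGood t (pvSplitB t fuel i j ks cands memo).2 := by
  intro ks i j
  induction ks with
  | nil =>
    intro cands memo hg hks
    simp only [pvSplitB]
    exact ⟨by simp, hg⟩
  | cons k rest ihk =>
    intro cands memo hg hks
    have hk := hks k List.mem_cons_self
    simp only [pvSplitB]
    by_cases htk : PySem.List.pyGetD t k "" = "+" ∨ PySem.List.pyGetD t k "" = "*"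
    · rw [if_pos htk]
      obtain ⟨hl1, hl2⟩ := IH i k memo hg hk.1
      obtain ⟨hr1, hr2⟩ := IH (k + 1) j (pvSolveB t fuel memo i k).2 hl2 hk.2
      have hrest := ihk
        (match (pvSolveB t fuel memo i k).1, (pvSolveB t fuel (pvSolveB t fuel memo i k).2 (k + 1) j).1 with
          | some l, some r => cands ++ [(if PySem.List.pyGetD t k "" = "+" then ([1] : List Int) else [2]) ++ l ++ r]
          | _, _ => cands)
        (pvSolveB t fuel (pvSolveB t fuel memo i k).2 (k + 1) j).2 hr2
        (fun k hk => hks k (List.mem_cons_of_mem _ hk))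
      refine ⟨?_, hrest.2⟩
      rw [hrest.1, hl1, hr1]
      have hcand : pvCandAt t (pvRef t) i j k
          = (match pvRef t i k, pvRef t (k + 1) j with
              | some l, some r => [(if PySem.List.pyGetD t k "" = "+" then ([1] : List Int) else [2]) ++ l ++ r]
              | _, _ => []) := by
        unfold pvCandAt
        rw [if_pos htk]
      rw [List.flatMap_cons, hcand]
      cases pvRef t i k <;> cases pvRef t (k + 1) j <;> simp
    · rw [if_neg htk]
      have hrest := ihk cands memo hg (fun k hk => hks k (List.mem_cons_of_mem _ hk))
      refine ⟨?_, hrest.2⟩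
      rw [hrest.1]
      have hcand : pvCandAt t (pvRef t) i j k = [] := by
        unfold pvCandAt
        rw [if_neg htk]
      rw [List.flatMap_cons, hcand, List.nil_append]

lemma pvSolveB_spec (t : List String) :
    ∀ (fuel : Nat) (i j : Int) (memo : PySem.Dict (Int × Int) (Option (List Int))),
      pvGood t memo → j - i < (fuel : Int) →
      (pvSolveB t fuel memo i j).1 = pvRef t i j ∧ pvGood t (pvSolveB t fuel memo i j).2 := by
  intro fuel
  induction fuel with
  | zero =>
    intro i j memo hg hfu
    simp only [pvSolveB]
    exact ⟨(pvRef_none t i j (by omega)).symm, hg⟩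
  | succ fuel ih =>
    intro i j memo hg hfu
    simp only [pvSolveB]
    cases hmem : memo.get? (i, j) with
    | some r =>
      exact ⟨hg (i, j) r hmem, hg⟩
    | none =>
      by_cases hb : j = i + 1
      · rw [if_pos hb]
        have hres : (if PySem.List.pyGetD t i "" = "id" then some ([4] : List Int) else none)
            = pvRef t i j := (pvRef_base t i j hb).symm
        exact ⟨hres, pvGood_insert t memo i j _ hg hres⟩
      · rw [if_neg hb]
        by_cases hs : i + 2 ≤ j
        · rw [if_pos hs]
          have hpm : (if PySem.List.pyGetD t i "" = "(" ∧ PySem.List.pyGetD t (j - 1) "" = ")" then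
                  ((match (pvSolveB t fuel memo (i + 1) (j - 1)).1 with
                    | some v => [[3] ++ v]
                    | none => ([] : List (List Int))), (pvSolveB t fuel memo (i + 1) (j - 1)).2)
                else (([] : List (List Int)), memo)).1 = pvParen t (pvRef t) i j
              ∧ pvGood t (if PySem.List.pyGetD t i "" = "(" ∧ PySem.List.pyGetD t (j - 1) "" = ")" then
                  ((match (pvSolveB t fuel memo (i + 1) (j - 1)).1 with
                    | some v => [[3] ++ v]
                    | none => ([] : List (List Int))), (pvSolveB t fuel memo (i + 1) (j - 1)).2)
                else (([] : List (List Int)), memo)).2 := by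
            by_cases hpar : PySem.List.pyGetD t i "" = "(" ∧ PySem.List.pyGetD t (j - 1) "" = ")"
            · rw [if_pos hpar]
              obtain ⟨h1, h2⟩ := ih (i + 1) (j - 1) memo hg (by omega)
              refine ⟨?_, h2⟩
              rw [h1]
              unfold pvParen
              rw [if_pos hpar]
            · rw [if_neg hpar]
              refine ⟨?_, hg⟩
              unfold pvParen
              rw [if_neg hpar]
          obtain ⟨hp1, hp2⟩ := hpm
          set pm := (if PySem.List.pyGetD t i "" = "(" ∧ PySem.List.pyGetD t (j - 1) "" = ")" then
              ((match (pvSolveB t fuel memo (i + 1) (j - 1)).1 with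
                | some v => [[3] ++ v]
                | none => ([] : List (List Int))), (pvSolveB t fuel memo (i + 1) (j - 1)).2)
            else (([] : List (List Int)), memo)) with hpmdef
          have hks : ∀ k ∈ PySem.List.pyRange (i + 1) (j - 1) 1,
              k - i < (fuel : Int) ∧ j - (k + 1) < (fuel : Int) := by
            intro k hk
            rw [PySem.List.mem_pyRange_one] at hk
            omega
          obtain ⟨hc1, hc2⟩ := pvSplitB_spec t fuel ih (PySem.List.pyRange (i + 1) (j - 1) 1) i j pm.1 pm.2 hp2 hks
          have hres : PySem.List.min? (pvSplitB t fuel i j (PySem.List.pyRange (i + 1) (j - 1) 1) pm.1 pm.2).1 (fun x => x)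
              = pvRef t i j := by
            rw [hc1, hp1, pvRef_step t i j hs]
            rfl
          exact ⟨hres, pvGood_insert t _ i j _ hc2 hres⟩
        · rw [if_neg hs]
          have hres : (none : Option (List Int)) = pvRef t i j := (pvRef_none t i j (by omega)).symm
          exact ⟨hres, pvGood_insert t memo i j _ hg hres⟩

lemma pvB_eq_ref (t : List String) :
    lexicographic_min_derivation_alt t = pvRef t 0 (PySem.List.len t) := by
  have hempty : pvGood t (PySem.Dict.empty : PySem.Dict (Int × Int) (Option (List Int))) := by
    intro p r h
    rw [PySem.Dict.get?_empty] at h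
    cases h
  have h := pvSolveB_spec t (t.length + 1) 0 (PySem.List.len t) PySem.Dict.empty hempty
    (by simp only [PySem.List.len_eq]; push_cast; omega)
  exact h.1


-- ===== VERDICT (by name: the statement is the Claim_ definition above) =====
theorem lexicographic_min_derivation_spec : Claim_equal_lexicographic_min_derivation := by
  intro tokens _
  unfold Spec_lexicographic_min_derivation
  rw [pvA_eq_ref, pvB_eq_ref]
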